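-- pv_equiv track=rewrite | github.com/Priyansh2/music_classification | scripts/utils/CMI.py | N_P_Wli
-- ===== SOURCE A (Python) =====
-- from collections import defaultdict,Counter
--
-- def N_P_Wli(x):
-- 	##Computes N, P and max(W_li) of any utterance x which is each line of lyrics in our case
-- 	line = x
-- 	words = line.split("$$$$$")
-- 	temp=[]
-- 	for x in range(len(words)):
-- 		if len(words[x].split())==2:
-- 			temp+=words[x].split()
-- 		else:
-- 			temp+=[words[x]]
-- 	words=temp
-- 	cnt=0
-- 	s=0
-- 	lang_seq=[]
-- 	for x in range(2,len(words),3):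
-- 		if words[x] in ("en","hi"):
-- 			cnt+=1
-- 			if words[x]=="en":
-- 				lang_seq.append(1)
-- 			elif words[x]=="hi":
-- 				lang_seq.append(0)
-- 	if lang_seq:
-- 		for x in range(1,len(lang_seq)):
-- 			if lang_seq[x]!=lang_seq[x-1]:
-- 				s+=1
-- 	lang_words = Counter(lang_seq)
-- 	dominant_lang_words=max(lang_words[0],lang_words[1])
-- 	return cnt,s,dominant_lang_words
-- ===== SOURCE B (Python) =====
-- def N_P_Wli(x):
--     # Same preprocessing; then ONE pass with online counters (no lang_seq list, no Counter, no second loop).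
--     temp = []
--     for w in x.split("$$$$$"):
--         parts = w.split()
--         temp += parts if len(parts) == 2 else [w]
--     cnt = s = count_en = count_hi = 0
--     prev = None
--     for i in range(2, len(temp), 3):
--         tok = temp[i]
--         if tok in ("en", "hi"):
--             cnt += 1
--             if tok == "en":
--                 count_en += 1
--             else:
--                 count_hi += 1
--             if prev is not None and prev != tok:
--                 s += 1
--             prev = tok
--     return cnt, s, max(count_en, count_hi)
-- ===== Notes on version B (the rewrite author's own statement) =====
-- stated objective: simpler
-- what changed: B replaces A's intermediate lang_seq list, second adjacency loop and Counter by a single online pass over the token positions that maintains cnt, switch count, per-language counters and the previous language directly.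
import Mathlib
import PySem

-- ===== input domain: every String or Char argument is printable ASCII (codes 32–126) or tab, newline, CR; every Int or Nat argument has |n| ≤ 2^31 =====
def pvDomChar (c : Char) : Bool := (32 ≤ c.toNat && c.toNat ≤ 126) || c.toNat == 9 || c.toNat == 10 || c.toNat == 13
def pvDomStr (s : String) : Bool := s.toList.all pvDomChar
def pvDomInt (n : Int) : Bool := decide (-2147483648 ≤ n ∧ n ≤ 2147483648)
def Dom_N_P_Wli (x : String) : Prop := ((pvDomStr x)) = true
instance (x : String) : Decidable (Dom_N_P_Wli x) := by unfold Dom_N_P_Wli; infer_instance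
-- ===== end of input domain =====

-- B replaces A's lang_seq list + second loop + Counter by one online pass with counters (objective: simpler).

-- ===== PORT A =====
-- x.split("$$$$$"): sep is a nonempty literal, so PySem.Str.split? is always `some`; .getD [] is dead.
-- loop bodies named for readability; they are the literal per-iteration code of each Python

-- A: body of the preprocessing loop (temp += words[x].split() / temp += [words[x]])
def pvCollectA (temp : List String) (w : String) : List String :=
  if (PySem.Str.split₀ w).length = 2 then temp ++ PySem.Str.split₀ w
  else temp ++ [w]

-- A: body of the main loop over range(2, len(words), 3)
def pvStepA (p : Int × List Int) (w : String) : Int × List Int :=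
  if w = "en" ∨ w = "hi" then
    (p.1 + 1,
     if w = "en" then p.2 ++ [1]
     else if w = "hi" then p.2 ++ [0] else p.2)
  else p

def N_P_Wli (x : String) : Int × Int × Int :=
  let words := (PySem.Str.split? x "$$$$$").getD []
  let temp : List String := (PySem.List.pyRange 0 (words.length : Int) 1).foldl
    (fun temp i => pvCollectA temp (PySem.List.pyGetD words i "")) []
  let words2 := temp
  let res := (PySem.List.pyRange 2 (words2.length : Int) 3).foldl
    (fun p i => pvStepA p (PySem.List.pyGetD words2 i "")) (0, [])
  let cnt := res.1
  let lang_seq := res.2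
  let s : Int :=
    if lang_seq ≠ [] then
      (PySem.List.pyRange 1 (lang_seq.length : Int) 1).foldl
        (fun s i =>
          if PySem.List.pyGetD lang_seq i 0 ≠ PySem.List.pyGetD lang_seq (i - 1) 0 then s + 1
          else s) 0
    else 0
  let lang_words := PySem.Dict.counter lang_seq
  let dominant := max (lang_words.getD 0 0) (lang_words.getD 1 0)
  (cnt, s, dominant)

-- ===== PORT B =====
-- B: body of the preprocessing loop (temp += parts if len(parts) == 2 else [w])
def pvCollect (temp : List String) (w : String) : List String :=
  temp ++ (if (PySem.Str.split₀ w).length = 2 then PySem.Str.split₀ w else [w])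

-- B: body of the single online loop; state = (cnt, s, count_en, count_hi, prev)
def pvStepB (st : Int × Int × Int × Int × Option String) (tok : String) :
    Int × Int × Int × Int × Option String :=
  if tok = "en" ∨ tok = "hi" then
    (st.1 + 1,
     (if (match st.2.2.2.2 with
          | some p => p != tok
          | none => false : Bool) then st.2.1 + 1 else st.2.1),
     (if tok = "en" then st.2.2.1 + 1 else st.2.2.1),
     (if tok = "en" then st.2.2.2.1 else st.2.2.2.1 + 1),
     some tok)
  else st

def N_P_Wli_alt (x : String) : Int × Int × Int :=
  let temp : List String := ((PySem.Str.split? x "$$$$$").getD []).foldl pvCollect []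
  let st := (PySem.List.pyRange 2 (temp.length : Int) 3).foldl
    (fun st i => pvStepB st (PySem.List.pyGetD temp i "")) (0, 0, 0, 0, none)
  (st.1, st.2.1, max st.2.2.1 st.2.2.2.1)

-- ===== PRECONDITION & SPEC =====
def Spec_N_P_Wli (x : String) (out : Int × Int × Int) : Prop := out = N_P_Wli_alt x
instance (x : String) (out : Int × Int × Int) : Decidable (Spec_N_P_Wli x out) := by unfold Spec_N_P_Wli; infer_instance

-- ===== CLAIM (what is proved, stated in full; the proofs are below) =====
def Claim_equal_N_P_Wli : Prop := ∀ (x : String), Dom_N_P_Wli x → Spec_N_P_Wli x (N_P_Wli x)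

-- ===== LEMMAS AND PROOFS =====

-- the 0/1 language sequence A builds out of a token list
def pvBits (toks : List String) : List Int :=
  toks.filterMap (fun w => if w = "en" then some 1 else if w = "hi" then some 0 else none)

-- switch count of a bit list, given the previous bit
def pvAdjB (b : Int) : List Int → Int
  | [] => 0
  | c :: t => (if c ≠ b then 1 else 0) + pvAdjB c t

def pvAdj : List Int → Int
  | [] => 0
  | c :: t => pvAdjB c t

-- B's online switch count, given the previous token (none / "en" / "hi")
def pvAdjF (prev : Option String) : List String → Int
  | [] => 0
  | w :: t =>
    if w = "en" ∨ w = "hi" then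
      (if (match prev with | some p => p != w | none => false : Bool) then 1 else 0) + pvAdjF (some w) t
    else pvAdjF prev t

-- last language token seen
def pvLastF (prev : Option String) : List String → Option String
  | [] => prev
  | w :: t => if w = "en" ∨ w = "hi" then pvLastF (some w) t else pvLastF prev t

theorem pvBits_cons (w : String) (t : List String) :
    pvBits (w :: t) =
      (if w = "en" then [(1 : Int)] else if w = "hi" then [(0 : Int)] else []) ++ pvBits t := by
  by_cases h1 : w = "en" <;> by_cases h2 : w = "hi" <;>
    simp [pvBits, h1, h2]

-- A's main loop accumulates count and the bit sequence
theorem pvRunA (toks : List String) : ∀ (c : Int) (seq : List Int),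
    toks.foldl pvStepA (c, seq) = (c + ((pvBits toks).length : Int), seq ++ pvBits toks) := by
  induction toks with
  | nil => intro c seq; simp [pvBits]
  | cons w t ih =>
      intro c seq
      by_cases h1 : w = "en"
      · simp [pvStepA, h1, ih, pvBits_cons]; omega
      · by_cases h2 : w = "hi"
        · simp [pvStepA, h2, ih, pvBits_cons]; omega
        · simp [pvStepA, h1, h2, ih, pvBits_cons]

-- the index-based adjacency loop is pvAdjB
theorem pvSLoopAux (seq : List Int) : ∀ (a : Int) (s0 : Int),
    (List.range seq.length).foldl
      (fun s k => if (a :: seq).getD (k + 1) 0 ≠ (a :: seq).getD k 0 then s + 1 else s) s0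
      = s0 + pvAdjB a seq := by
  induction seq with
  | nil => intro a s0; simp [pvAdjB]
  | cons c t ih =>
      intro a s0
      rw [List.length_cons, List.range_succ_eq_map, List.foldl_cons, List.foldl_map]
      simp only [List.getD_cons_succ, List.getD_cons_zero]
      have hih := ih c (if c ≠ a then s0 + 1 else s0)
      simp only [List.getD_cons_succ] at hih
      rw [hih]
      simp only [pvAdjB]
      split <;> ring

theorem pvSLoop (seq : List Int) (s0 : Int) :
    (PySem.List.pyRange 1 (seq.length : Int) 1).foldl
      (fun s i => if PySem.List.pyGetD seq i 0 ≠ PySem.List.pyGetD seq (i - 1) 0 then s + 1 else s) s0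
      = s0 + pvAdj seq := by
  cases seq with
  | nil =>
      rw [PySem.List.pyRange_one_eq_nil (by simp)]
      simp [pvAdj]
  | cons a t =>
      rw [PySem.List.pyRange_one, List.foldl_map]
      have hlen : (((a :: t).length : Int) - 1).toNat = t.length := by
        simp
      rw [hlen]
      have hbody : (fun (s : Int) (k : ℕ) =>
            if PySem.List.pyGetD (a :: t) (1 + (k : Int)) 0 ≠ PySem.List.pyGetD (a :: t) (1 + (k : Int) - 1) 0
            then s + 1 else s)
          = (fun (s : Int) (k : ℕ) => if (a :: t).getD (k + 1) 0 ≠ (a :: t).getD k 0 then s + 1 else s) := by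
        funext s k
        have h1 : (1 : Int) + (k : Int) = ((k + 1 : ℕ) : Int) := by push_cast; ring
        rw [h1]
        have h2 : (((k + 1 : ℕ) : Int)) - 1 = ((k : ℕ) : Int) := by push_cast; ring
        rw [h2, PySem.List.pyGetD_natCast, PySem.List.pyGetD_natCast]
      rw [hbody, pvSLoopAux]
      rfl

-- B's single loop maintains count, switches, per-language counters and prev
theorem pvRunB (toks : List String) :
    ∀ (cnt s ce ch : Int) (prev : Option String),
    toks.foldl pvStepB (cnt, s, ce, ch, prev)
      = (cnt + ((pvBits toks).length : Int),
         s + pvAdjF prev toks,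
         ce + ((pvBits toks).count 1 : Int),
         ch + ((pvBits toks).count 0 : Int),
         pvLastF prev toks) := by
  induction toks with
  | nil => intro cnt s ce ch prev; simp [pvBits, pvAdjF, pvLastF]
  | cons w t ih =>
      intro cnt s ce ch prev
      rcases prev with _ | p
      all_goals by_cases h1 : w = "en"
      all_goals by_cases h2 : w = "hi"
      all_goals simp [List.foldl_cons, pvStepB, h1, h2, pvBits_cons, pvAdjF, pvLastF, ih]
      all_goals try split
      all_goals try constructor
      all_goals omega

theorem pvAdjF_some (toks : List String) : ∀ (p : String), p = "en" ∨ p = "hi" →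
    pvAdjF (some p) toks = pvAdjB (if p = "en" then 1 else 0) (pvBits toks) := by
  induction toks with
  | nil => intro p _; simp [pvAdjF, pvBits, pvAdjB]
  | cons w t ih =>
      intro p hp
      by_cases h1 : w = "en"
      · simp only [pvAdjF, h1, pvBits_cons]
        rw [ih "en" (Or.inl rfl)]
        rcases hp with h | h <;> subst h <;> simp [pvAdjB]
      · by_cases h2 : w = "hi"
        · simp only [pvAdjF, h2, pvBits_cons]
          rw [ih "hi" (Or.inr rfl)]
          rcases hp with h | h <;> subst h <;> simp [pvAdjB]
        · simp only [pvAdjF, h1, h2, pvBits_cons]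
          simp [ih p hp]

theorem pvAdjF_none (toks : List String) : pvAdjF none toks = pvAdj (pvBits toks) := by
  induction toks with
  | nil => simp [pvAdjF, pvBits, pvAdj]
  | cons w t ih =>
      by_cases h1 : w = "en"
      · simp only [pvAdjF, h1, pvBits_cons]
        rw [pvAdjF_some t "en" (Or.inl rfl)]
        simp [pvAdj]
      · by_cases h2 : w = "hi"
        · simp only [pvAdjF, h2, pvBits_cons]
          rw [pvAdjF_some t "hi" (Or.inr rfl)]
          simp [pvAdj]
        · simp only [pvAdjF, h1, h2, pvBits_cons]
          simpa using ih

theorem pvCollectA_eq : pvCollectA = pvCollect := by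
  funext temp w
  unfold pvCollectA pvCollect
  split <;> rfl


theorem N_P_Wli_spec : Claim_equal_N_P_Wli := by
  intro x _
  unfold Spec_N_P_Wli
  simp only [N_P_Wli, N_P_Wli_alt]
  rw [PySem.List.foldl_pyRange_zero_pyGetD' ((PySem.Str.split? x "$$$$$").getD []) "" pvCollectA [], pvCollectA_eq]
  set temp := ((PySem.Str.split? x "$$$$$").getD []).foldl pvCollect [] with htemp
  rw [← List.foldl_map (f := fun i => PySem.List.pyGetD temp i "") (g := pvStepA),
      ← List.foldl_map (f := fun i => PySem.List.pyGetD temp i "") (g := pvStepB)]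
  set toks := (PySem.List.pyRange 2 ((temp.length : Int)) 3).map (fun i => PySem.List.pyGetD temp i "") with htoks
  rw [pvRunA toks 0 [], pvRunB toks 0 0 0 0 none]
  -- defeq renormalisation: reduce the pair projections and [] ++ _ left by the rewrites
  show (0 + ((pvBits toks).length : Int),
        (if pvBits toks ≠ [] then
          List.foldl
            (fun s i =>
              if PySem.List.pyGetD (pvBits toks) i 0 ≠ PySem.List.pyGetD (pvBits toks) (i - 1) 0 then s + 1
              else s) 0 (PySem.List.pyRange 1 ((pvBits toks).length : Int) 1)
        else 0),
        max ((PySem.Dict.counter (pvBits toks)).getD 0 0) ((PySem.Dict.counter (pvBits toks)).getD 1 0))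
      = (0 + ((pvBits toks).length : Int), 0 + pvAdjF none toks,
        max (0 + ((pvBits toks).count 1 : Int)) (0 + ((pvBits toks).count 0 : Int)))
  rw [PySem.Dict.getD_counter (pvBits toks) 0, PySem.Dict.getD_counter (pvBits toks) 1, pvAdjF_none]
  refine congrArg₂ Prod.mk rfl (congrArg₂ Prod.mk ?_ ?_)
  · by_cases hbs : pvBits toks = []
    · rw [if_neg (by simp [hbs]), hbs]
      rfl
    · rw [if_pos hbs, pvSLoop (pvBits toks) 0]
  · rw [max_comm]
    simp
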